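-- pv_equiv track=rewrite | github.com/brucehart/euler | problem872.py | construct_tree_path
-- ===== SOURCE A (Python) =====
-- def construct_tree_path(n):
--     path = []
--     current = n
--     while current > 1:
--         path.append(current)
--         if current % 2 == 0:
--             current = current // 2
--         else:
--             current = (current - 1) // 2
--     path.append(1)
--     return path[::-1]
-- ===== SOURCE B (Python) =====
-- def construct_tree_path(n):
--     if n <= 1:
--         return [1]
--     s = bin(n)[2:]
--     return [int(s[:i], 2) for i in range(1, len(s) + 1)]
-- ===== Notes on version B (the rewrite author's own statement) =====
-- stated objective: idiomatic
-- what changed: B builds the path directly as the increasing prefixes of n's binary representation instead of repeatedly halving into a list and reversing it.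
import Mathlib
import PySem

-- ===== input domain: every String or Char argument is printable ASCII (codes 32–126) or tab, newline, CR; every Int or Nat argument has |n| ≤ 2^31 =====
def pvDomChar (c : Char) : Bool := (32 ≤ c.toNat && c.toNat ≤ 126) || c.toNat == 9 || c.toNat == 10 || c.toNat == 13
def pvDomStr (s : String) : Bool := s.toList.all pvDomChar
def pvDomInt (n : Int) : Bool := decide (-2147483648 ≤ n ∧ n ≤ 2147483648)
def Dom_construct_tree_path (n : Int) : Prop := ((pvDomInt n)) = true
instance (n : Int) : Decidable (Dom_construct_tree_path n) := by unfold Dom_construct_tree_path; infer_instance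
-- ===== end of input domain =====

-- B builds the halving path directly as the prefixes of n's binary representation
-- instead of repeatedly halving into a list and reversing it (objective: idiomatic).

-- ===== PORT A =====
-- the while-loop of A: state = (current, path)
def pvLoopA (current : Int) (path : List Int) : List Int :=
  if h : current > 1 then
    pvLoopA (if PySem.Int.mod current 2 == 0 then PySem.Int.floordiv current 2
             else PySem.Int.floordiv (current - 1) 2) (path ++ [current])
  else path ++ [1]
termination_by current.toNat
decreasing_by
  simp only [PySem.Int.floordiv_eq_ediv_of_pos (by omega : (0:Int) < 2)]
  split <;> omega

def construct_tree_path (n : Int) : List Int :=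
  (PySem.List.slice? (pvLoopA n []) none none (-1)).getD []   -- path[::-1]; always `some`

-- ===== PORT B =====
-- bin(m)[2:] as a list of chars; exact for m ≥ 1 (ported by hand, PySem has no bin)
def pvBin (m : Nat) : List Char :=
  if m = 0 then [] else pvBin (m / 2) ++ [if m % 2 = 1 then '1' else '0']

-- int(s, 2) for a string of '0'/'1' chars (ported by hand, exact on that domain)
def pvParseBin (s : List Char) : Int :=
  s.foldl (fun acc c => 2 * acc + (if c = '1' then 1 else 0)) 0

def construct_tree_path_alt (n : Int) : List Int :=
  if n ≤ 1 then [1]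
  else
    let s := pvBin n.toNat
    (PySem.List.pyRange 1 ((s.length : Int) + 1) 1).map (fun i => pvParseBin (s.take i.toNat))

-- ===== PRECONDITION & SPEC =====
def Spec_construct_tree_path (n : Int) (out : List Int) : Prop := out = construct_tree_path_alt n
instance (n : Int) (out : List Int) : Decidable (Spec_construct_tree_path n out) := by unfold Spec_construct_tree_path; infer_instance

-- ===== CLAIM (what is proved, stated in full; the proofs are below) =====
def Claim_equal_construct_tree_path : Prop := ∀ (n : Int), Dom_construct_tree_path n → Spec_construct_tree_path n (construct_tree_path n)

-- ===== LEMMAS AND PROOFS =====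

lemma ctp_A_def (n : Int) : construct_tree_path n = (pvLoopA n []).reverse := by
  simp [construct_tree_path, PySem.List.slice?_none_none_neg_one]

lemma pvParseBin_append_bit (l : List Char) (c : Char) :
    pvParseBin (l ++ [c]) = 2 * pvParseBin l + (if c = '1' then 1 else 0) := by
  simp [pvParseBin]

lemma pvBin_pos (m : Nat) (h : m ≠ 0) :
    pvBin m = pvBin (m / 2) ++ [if m % 2 = 1 then '1' else '0'] := by
  rw [pvBin]; simp [h]

lemma pvParseBin_pvBin : ∀ m : Nat, pvParseBin (pvBin m) = (m : Int) := by
  intro m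
  induction m using Nat.strong_induction_on with
  | _ m ih =>
    by_cases h : m = 0
    · subst h; simp [pvBin, pvParseBin]
    · rw [pvBin_pos m h, pvParseBin_append_bit, ih (m / 2) (by omega)]
      rcases Nat.mod_two_eq_zero_or_one m with hm | hm <;> simp [hm] <;> omega

lemma pvBin_len_pos (m : Nat) (h : 1 ≤ m) : 1 ≤ (pvBin m).length := by
  rw [pvBin_pos m (by omega)]; simp

-- canonical form of B's list for a positive Nat
def pvBcore (m : Nat) : List Int :=
  (List.range' 1 (pvBin m).length).map (fun i => pvParseBin ((pvBin m).take i))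

lemma alt_eq_bcore (m : Nat) (h : 1 ≤ m) :
    construct_tree_path_alt (m : Int) = pvBcore m := by
  by_cases h1 : m = 1
  · subst h1
    simp [construct_tree_path_alt, pvBcore, pvBin, pvParseBin]
  · have h2 : 2 ≤ m := by omega
    have hng : ¬ ((m : Int) ≤ 1) := by exact_mod_cast by omega
    rw [construct_tree_path_alt]
    simp only [hng, if_false]
    rw [PySem.List.pyRange_one]
    have htn : ((m : Int)).toNat = m := by omega
    rw [htn]
    have hL : ((((pvBin m).length : Int) + 1) - 1).toNat = (pvBin m).length := by omega
    rw [hL, pvBcore, List.range'_eq_map_range]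
    rw [List.map_map, List.map_map]
    apply List.map_congr_left
    intro k _
    have : ((1 : Int) + (k : Int)).toNat = 1 + k := by omega
    simp [this]

lemma bcore_step (m : Nat) (h : 2 ≤ m) :
    pvBcore m = pvBcore (m / 2) ++ [(m : Int)] := by
  have hhalf : 1 ≤ m / 2 := by omega
  have hL : 1 ≤ (pvBin (m / 2)).length := pvBin_len_pos _ hhalf
  rw [pvBcore, pvBcore, pvBin_pos m (by omega)]
  set s' := pvBin (m / 2) with hs'
  set b := if m % 2 = 1 then '1' else '0' with hb
  rw [List.length_append, List.length_singleton, List.range'_1_concat, List.map_append]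
  congr 1
  · apply List.map_congr_left
    intro i hi
    have hi' : i ≤ s'.length := by
      have := List.mem_range'.mp hi
      omega
    rw [List.take_append_of_le_length hi']
  · simp only [List.map_cons, List.map_nil]
    have : (s' ++ [b]).take (1 + s'.length) = s' ++ [b] := by
      apply List.take_of_length_le
      simp [Nat.add_comm]
    rw [this, ← pvBin_pos m (by omega), pvParseBin_pvBin]

lemma loopA_append : ∀ (fm : Nat) (c : Int), c.toNat = fm →
    ∀ p : List Int, pvLoopA c p = p ++ pvLoopA c [] := by
  intro fm
  induction fm using Nat.strong_induction_on with
  | _ fm ih =>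
    intro c hc p
    by_cases h : c > 1
    · conv_lhs => rw [pvLoopA]
      conv_rhs => rw [pvLoopA]
      simp only [h, dif_pos]
      set nxt := if PySem.Int.mod c 2 == 0 then PySem.Int.floordiv c 2
                 else PySem.Int.floordiv (c - 1) 2 with hnxt
      have hlt : nxt.toNat < fm := by
        rw [hnxt]
        simp only [PySem.Int.floordiv_eq_ediv_of_pos (by omega : (0:Int) < 2)]
        split <;> omega
      rw [ih nxt.toNat hlt nxt rfl (p ++ [c]), ih nxt.toNat hlt nxt rfl ([] ++ [c])]
      simp
    · conv_lhs => rw [pvLoopA]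
      conv_rhs => rw [pvLoopA]
      simp [h]

lemma loopA_step (c : Int) (h : c > 1) :
    pvLoopA c [] = c :: pvLoopA (if PySem.Int.mod c 2 == 0 then PySem.Int.floordiv c 2
                                 else PySem.Int.floordiv (c - 1) 2) [] := by
  conv_lhs => rw [pvLoopA]
  simp only [h, dif_pos]
  rw [loopA_append _ _ rfl]
  simp

lemma next_eq_half (c : Int) (h : c > 1) :
    (if PySem.Int.mod c 2 == 0 then PySem.Int.floordiv c 2
     else PySem.Int.floordiv (c - 1) 2) = ((c.toNat / 2 : Nat) : Int) := by
  simp only [PySem.Int.floordiv_eq_ediv_of_pos (by omega : (0:Int) < 2),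
        PySem.Int.mod_eq_emod_of_pos (by omega : (0:Int) < 2), beq_iff_eq]
  split <;> rename_i hp <;> omega

lemma main_eq : ∀ (fm : Nat) (n : Int), n.toNat = fm →
    construct_tree_path n = construct_tree_path_alt n := by
  intro fm
  induction fm using Nat.strong_induction_on with
  | _ fm ih =>
    intro n hn
    by_cases h : n > 1
    · have h2 : 2 ≤ n.toNat := by omega
      have hhalf : 1 ≤ n.toNat / 2 := by omega
      rw [ctp_A_def, loopA_step n h, next_eq_half n h]
      have hIH : construct_tree_path ((n.toNat / 2 : Nat) : Int)
          = construct_tree_path_alt ((n.toNat / 2 : Nat) : Int) := by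
        apply ih (n.toNat / 2) (by omega)
        omega
      rw [List.reverse_cons, ← ctp_A_def, hIH,
          alt_eq_bcore (n.toNat / 2) hhalf]
      have hcast : construct_tree_path_alt n = construct_tree_path_alt ((n.toNat : Nat) : Int) := by
        congr 1; omega
      rw [hcast, alt_eq_bcore n.toNat (by omega), bcore_step n.toNat h2]
      congr 1
      simp
      omega
    · rw [ctp_A_def, pvLoopA]
      simp only [h, dif_neg, not_false_iff]
      rw [construct_tree_path_alt]
      simp [show n ≤ 1 by omega]

-- ===== VERDICT (by name: the statement is the Claim_ definition above) =====
theorem construct_tree_path_spec : Claim_equal_construct_tree_path := by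
  intro n _
  unfold Spec_construct_tree_path
  exact main_eq n.toNat n rfl
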